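-- pv_equiv track=rewrite | github.com/Leftfish/Advent-of-Code-2024 | 02/d02.py | check_safety_dampener
-- ===== SOURCE A (Python) =====
-- def check_safety(level):
--     diffs = [level[i+1] - level[i] for i in range(len(level)-1)]
--
--     abs_check = all([3 >= abs(d) >= 1 for d in diffs])
--     sign_check = all([d > 0 for d in diffs]) or all([d < 0 for d in diffs])
--
--     return abs_check and sign_check
--
-- def check_safety_dampener(level):
--     i = 0
--     increasing = None
--     candidate = None
--
--     # find the index of the first error
--     while i < len(level)-1:
--         diff = level[i+1] - level[i]
--
--         if increasing is None:
--             increasing = diff > 0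
--
--         if increasing and (diff > 3 or diff < 1) or \
--             not increasing and (diff > -1 or diff < -3):
--             candidate = i
--             break
--
--         i += 1
--
--     # if no errors, all good!
--     if candidate is None:
--         return True
--
--     # remove the number at index, index-1 and index+1, recheck
--     else:
--         updates = []
--         for idx in (candidate-1, candidate, candidate+1):
--             if idx < 0 or idx > len(level)-1:
--                 continue
--             new_level = level[::]
--             new_level.pop(idx)
--             updates.append(new_level)
--
--         for updated_level in updates:
--             if check_safety(updated_level):
--                 return True
--
--     return False
-- ===== SOURCE B (Python) =====
-- def check_safety(level):
--     diffs = [b - a for a, b in zip(level, level[1:])]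
--     return all(1 <= d <= 3 for d in diffs) or all(-3 <= d <= -1 for d in diffs)
--
-- def check_safety_dampener(level):
--     if check_safety(level):
--         return True
--     return any(check_safety(level[:i] + level[i+1:]) for i in range(len(level)))
-- ===== Notes on version B (the rewrite author's own statement) =====
-- stated objective: simpler
-- what changed: B replaces A's stateful first-error scan followed by a localized three-candidate pop-and-retry with plain brute force over every single-element deletion, and rewrites the safety check as one disjunction of two all-in-range tests.
import Mathlib
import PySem

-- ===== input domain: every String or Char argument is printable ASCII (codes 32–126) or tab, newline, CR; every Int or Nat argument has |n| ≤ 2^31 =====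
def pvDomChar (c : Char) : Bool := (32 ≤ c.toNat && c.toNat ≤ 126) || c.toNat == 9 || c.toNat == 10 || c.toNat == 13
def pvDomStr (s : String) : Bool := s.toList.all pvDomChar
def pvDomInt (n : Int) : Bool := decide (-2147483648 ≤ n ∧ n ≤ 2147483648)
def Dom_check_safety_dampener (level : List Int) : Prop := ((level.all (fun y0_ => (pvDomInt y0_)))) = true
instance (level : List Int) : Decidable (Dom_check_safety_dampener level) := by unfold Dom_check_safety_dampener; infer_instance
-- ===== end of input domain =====

-- B is the plain brute force over all single-element deletions, instead of A's
-- first-error scan plus localized three-candidate retry; objective: simpler.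

-- ===== PORT A =====
-- A's check_safety: diffs list via range/indexing, abs check AND sign check.
def check_safety (level : List Int) : Bool :=
  let diffs := (PySem.List.pyRange 0 ((level.length : Int) - 1) 1).map
      (fun i => PySem.List.pyGetD level (i + 1) 0 - PySem.List.pyGetD level i 0)
  let abs_check := diffs.all (fun d => decide (3 ≥ |d| ∧ |d| ≥ 1))
  let sign_check := diffs.all (fun d => decide (d > 0)) || diffs.all (fun d => decide (d < 0))
  abs_check && sign_check

-- A's while loop: walk i upward, fix `increasing` on the first step, stop at the
-- first violating index (`candidate`).  Indices are always in range, so pyGetD's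
-- default is never read.
def findCand (level : List Int) (i : Nat) (increasing : Option Bool) : Option Nat :=
  if h : (i : Int) < (level.length : Int) - 1 then
    let diff := PySem.List.pyGetD level ((i : Int) + 1) 0 - PySem.List.pyGetD level (i : Int) 0
    let inc := increasing.getD (decide (diff > 0))
    if (inc && (decide (diff > 3) || decide (diff < 1))) ||
       (!inc && (decide (diff > -1) || decide (diff < -3))) then some i
    else findCand level (i + 1) (some inc)
  else none
termination_by level.length - 1 - i
decreasing_by omega

def check_safety_dampener (level : List Int) : Bool :=
  match findCand level 0 none with
  | none => true
  | some candidate =>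
    -- build `updates` = level with index candidate-1 / candidate / candidate+1 popped
    let updates := [((candidate : Int) - 1), (candidate : Int), ((candidate : Int) + 1)].foldl
      (fun acc idx =>
        if idx < 0 || idx > (level.length : Int) - 1 then acc
        else match PySem.List.pop? level idx with
          | some r => acc ++ [r.2]   -- r.2 = the list after the pop; idx is in range so pop? succeeds
          | none => acc)
      []
    updates.any check_safety

-- ===== PORT B =====
def check_safety_alt (level : List Int) : Bool :=
  let diffs := List.zipWith (fun a b => b - a) level (PySem.List.slice level (some 1) none)
  diffs.all (fun d => decide (1 ≤ d ∧ d ≤ 3)) || diffs.all (fun d => decide (-3 ≤ d ∧ d ≤ -1))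

def check_safety_dampener_alt (level : List Int) : Bool :=
  if check_safety_alt level then true
  else (PySem.List.pyRange 0 (level.length : Int) 1).any (fun i =>
    check_safety_alt (PySem.List.slice level none (some i) ++
                      PySem.List.slice level (some (i + 1)) none))

-- ===== PRECONDITION & SPEC =====
def Spec_check_safety_dampener (level : List Int) (out : Bool) : Prop := out = check_safety_dampener_alt level
instance (level : List Int) (out : Bool) : Decidable (Spec_check_safety_dampener level out) := by unfold Spec_check_safety_dampener; infer_instance

-- ===== CLAIM (what is proved, stated in full; the proofs are below) =====
def Claim_equal_check_safety_dampener : Prop := ∀ (level : List Int), Dom_check_safety_dampener level → Spec_check_safety_dampener level (check_safety_dampener level)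

-- ===== LEMMAS AND PROOFS =====

-- the m-th difference of a level, with getD (never out of range where used)
def dAt (l : List Int) (m : Nat) : Int := l.getD (m + 1) 0 - l.getD m 0

-- the direction A fixes on its first step
def inc0 (l : List Int) : Bool := decide (dAt l 0 > 0)

-- "diff d is acceptable for direction b"
def okb (b : Bool) (d : Int) : Bool :=
  if b then decide (1 ≤ d ∧ d ≤ 3) else decide (-3 ≤ d ∧ d ≤ -1)

def AllOk (b : Bool) (l : List Int) : Prop := ∀ m, m + 1 < l.length → okb b (dAt l m) = true

-- l with index j removed
def del (l : List Int) (j : Nat) : List Int := l.take j ++ l.drop (j + 1)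

theorem okb_sign {b : Bool} {d : Int} (h : okb b d = true) : b = decide (0 < d) := by
  cases b <;> simp [okb] at h ⊢ <;> omega

theorem dAt_eq (l : List Int) (m : Nat) (h : m + 1 < l.length) :
    dAt l m = l[m + 1] - l[m] := by
  simp [dAt, List.getD_eq_getElem?_getD, h, (by omega : m < l.length)]

theorem length_del (l : List Int) (j : Nat) (h : j < l.length) :
    (del l j).length = l.length - 1 := by
  simp [del]; omega

theorem getD_del (l : List Int) (j m : Nat) (hj : j < l.length) (hm : m < l.length - 1) :
    (del l j).getD m 0 = if m < j then l.getD m 0 else l.getD (m + 1) 0 := by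
  unfold del
  rcases Nat.lt_or_ge m j with h | h
  · rw [if_pos h, List.getD_eq_getElem?_getD, List.getElem?_append_left (by simp; omega)]
    simp [h, List.getD_eq_getElem?_getD]
  · rw [if_neg (by omega), List.getD_eq_getElem?_getD,
      List.getElem?_append_right (by simp; omega)]
    rw [List.getElem?_drop, List.getD_eq_getElem?_getD]
    congr 2
    simp
    omega

theorem dAt_del (l : List Int) (j m : Nat) (hj : j < l.length) (hm : m + 1 < l.length - 1) :
    dAt (del l j) m =
      if m + 1 < j then dAt l m
      else if j ≤ m then dAt l (m + 1)
      else l.getD (m + 2) 0 - l.getD m 0 := by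
  unfold dAt
  rw [getD_del l j m hj (by omega), getD_del l j (m + 1) hj (by omega)]
  split_ifs <;> (try rfl) <;> omega

theorem abs_cond (d : Int) : (3 ≥ |d| ∧ |d| ≥ 1) ↔ ((1 ≤ d ∧ d ≤ 3) ∨ (-3 ≤ d ∧ d ≤ -1)) := by
  rw [ge_iff_le, abs_le, ge_iff_le, le_abs]
  omega

-- both programs' diffs lists equal (range (n-1)).map (dAt l)
theorem diffsB_eq (l : List Int) :
    List.zipWith (fun a b => b - a) l l.tail = (List.range (l.length - 1)).map (dAt l) := by
  apply List.ext_getElem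
  · simp
  · intro k h1 h2
    simp only [List.getElem_zipWith, List.getElem_map, List.getElem_range]
    simp only [List.length_zipWith, List.length_tail] at h1
    rw [List.getElem_tail, dAt_eq l k (by omega)]

theorem diffsA_eq (l : List Int) :
    (PySem.List.pyRange 0 ((l.length : Int) - 1) 1).map
      (fun i => PySem.List.pyGetD l (i + 1) 0 - PySem.List.pyGetD l i 0)
      = (List.range (l.length - 1)).map (dAt l) := by
  rw [PySem.List.pyRange_one, List.map_map]
  have hn : (((l.length : Int) - 1) - 0).toNat = l.length - 1 := by omega
  rw [hn]
  apply List.map_congr_left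
  intro k _
  simp only [Function.comp_apply, zero_add]
  have h1 : (k : Int) + 1 = ((k + 1 : Nat) : Int) := by push_cast; ring
  rw [h1, PySem.List.pyGetD_natCast, PySem.List.pyGetD_natCast]
  rfl

theorem all_diffs_iff (l : List Int) (p : Int → Bool) :
    ((List.range (l.length - 1)).map (dAt l)).all p = true ↔
      ∀ m, m + 1 < l.length → p (dAt l m) = true := by
  simp only [List.all_eq_true, List.mem_map, List.mem_range]
  constructor
  · intro h m hm
    exact h _ ⟨m, by omega, rfl⟩
  · rintro h x ⟨m, hm, rfl⟩
    exact h m (by omega)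

theorem safe_alt_iff (l : List Int) :
    check_safety_alt l = true ↔ AllOk true l ∨ AllOk false l := by
  unfold check_safety_alt
  rw [PySem.List.slice_from_one, diffsB_eq, Bool.or_eq_true, all_diffs_iff, all_diffs_iff]
  unfold AllOk okb
  simp

theorem checkA_eq_alt (l : List Int) : check_safety l = check_safety_alt l := by
  unfold check_safety check_safety_alt
  rw [diffsA_eq, PySem.List.slice_from_one, diffsB_eq, Bool.eq_iff_iff]
  simp only [Bool.and_eq_true, Bool.or_eq_true, all_diffs_iff, decide_eq_true_eq]
  constructor
  · rintro ⟨h1, h2 | h2⟩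
    · exact Or.inl fun m hm => by
        have := (abs_cond _).mp (h1 m hm); have := h2 m hm; omega
    · exact Or.inr fun m hm => by
        have := (abs_cond _).mp (h1 m hm); have := h2 m hm; omega
  · rintro (h | h)
    · exact ⟨fun m hm => (abs_cond _).mpr (Or.inl (h m hm)),
        Or.inl fun m hm => by have := h m hm; omega⟩
    · exact ⟨fun m hm => (abs_cond _).mpr (Or.inr (h m hm)),
        Or.inr fun m hm => by have := h m hm; omega⟩

-- the loop's violation test is the negation of okb
theorem viol_eq (bb : Bool) (d : Int) :
    ((bb && (decide (d > 3) || decide (d < 1))) ||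
     (!bb && (decide (d > -1) || decide (d < -3)))) = !okb bb d := by
  cases bb <;> unfold okb <;> simp only [Bool.false_and, Bool.true_and, Bool.not_false,
    Bool.not_true, Bool.false_or, Bool.or_false, Bool.false_eq_true, reduceIte] <;>
    rw [Bool.eq_iff_iff] <;> simp <;> omega

theorem dAt_loop (l : List Int) (i : Nat) :
    PySem.List.pyGetD l ((i : Int) + 1) 0 - PySem.List.pyGetD l (i : Int) 0 = dAt l i := by
  have h1 : (i : Int) + 1 = ((i + 1 : Nat) : Int) := by push_cast; ring
  rw [h1, PySem.List.pyGetD_natCast, PySem.List.pyGetD_natCast]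
  rfl

theorem findCand_some_spec (l : List Int) (inc? : Option Bool) (i c : Nat)
    (h : findCand l i inc? = some c) :
    i ≤ c ∧ c + 1 < l.length ∧
      okb (inc?.getD (decide (dAt l i > 0))) (dAt l c) = false ∧
      ∀ m, i ≤ m → m < c → okb (inc?.getD (decide (dAt l i > 0))) (dAt l m) = true := by
  revert h
  fun_induction findCand l i inc? with
  | case1 i h hlt dval bval hcond =>
    intro hc
    obtain rfl : i = c := by simpa using hc
    have hd : dval = dAt l i := dAt_loop l i
    rw [viol_eq] at hcond
    rw [Bool.not_eq_eq_eq_not, Bool.not_true] at hcond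
    rw [hd] at hcond
    have hb : (h.getD (decide (dAt l i > 0))) = bval := by rw [← hd]
    rw [hb]
    exact ⟨le_refl _, by omega, hcond, fun m h1 h2 => by omega⟩
  | case2 i h hlt dval bval hcond ih =>
    intro hc
    have hd : dval = dAt l i := dAt_loop l i
    rw [viol_eq, Bool.not_eq_true', Bool.not_eq_false] at hcond
    obtain ⟨ih1, ih2, ih3, ih4⟩ := ih hc
    simp only [Option.getD_some] at ih3 ih4
    have hb : (h.getD (decide (dAt l i > 0))) = bval := by rw [← hd]
    rw [hd] at hcond
    refine ⟨by omega, ih2, by rw [hb]; exact ih3, ?_⟩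
    intro m h1 h2
    rw [hb]
    rcases Nat.eq_or_lt_of_le h1 with rfl | h1'
    · exact hcond
    · exact ih4 m h1' h2
  | case3 i h =>
    intro hc
    exact absurd hc (by simp)

theorem findCand_none_spec (l : List Int) (inc? : Option Bool) (i : Nat)
    (h : findCand l i inc? = none) :
    ∀ m, i ≤ m → m + 1 < l.length → okb (inc?.getD (decide (dAt l i > 0))) (dAt l m) = true := by
  revert h
  fun_induction findCand l i inc? with
  | case1 i h hlt dval bval hcond =>
    intro hc
    exact absurd hc (by simp)
  | case2 i h hlt dval bval hcond ih =>
    intro hc m h1 h2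
    have hd : dval = dAt l i := dAt_loop l i
    rw [viol_eq, Bool.not_eq_true', Bool.not_eq_false] at hcond
    have hb : (h.getD (decide (dAt l i > 0))) = bval := by rw [← hd]
    rw [hd] at hcond
    rw [hb]
    rcases Nat.eq_or_lt_of_le h1 with rfl | h1'
    · exact hcond
    · have := ih hc m h1' h2
      simpa using this
  | case3 i h =>
    intro _ m h1 h2
    omega

theorem alt_of_allOk (l : List Int) (b : Bool) (h : AllOk b l) :
    check_safety_alt l = true := by
  rw [safe_alt_iff]
  cases b
  · exact Or.inr h
  · exact Or.inl h

theorem del_eq_eraseIdx (l : List Int) (j : Nat) : l.eraseIdx j = del l j :=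
  List.eraseIdx_eq_take_drop_succ l j

theorem inc0_eq (l : List Int) : inc0 l = decide (0 < dAt l 0) := rfl

-- A's updates/foldl block, computed out
theorem lhs_eq (l : List Int) (c : Nat) (hF : findCand l 0 none = some c)
    (hc : c + 1 < l.length) :
    check_safety_dampener l =
      ((if c = 0 then [] else [del l (c - 1)]) ++ [del l c, del l (c + 1)]).any check_safety := by
  unfold check_safety_dampener
  rw [hF]
  simp only [List.foldl_cons, List.foldl_nil]
  have e2 : ((c : Int) < 0 || (c : Int) > (l.length : Int) - 1) = false := by
    simp; omega
  have e3 : ((c : Int) + 1 < 0 || (c : Int) + 1 > (l.length : Int) - 1) = false := by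
    simp; omega
  rw [e2, e3]
  simp only [Bool.false_eq_true, if_false]
  have p2 : PySem.List.pop? l (c : Int) = some (l[c]'(by omega), l.eraseIdx c) :=
    PySem.List.pop?_natCast _ _ (by omega)
  have hcast : (c : Int) + 1 = ((c + 1 : Nat) : Int) := by push_cast; ring
  have p3 : PySem.List.pop? l ((c : Int) + 1) = some (l[c+1]'(by omega), l.eraseIdx (c+1)) := by
    rw [hcast]; exact PySem.List.pop?_natCast _ _ (by omega)
  rw [p2, p3]
  by_cases h0 : c = 0
  · have e1 : ((c : Int) - 1 < 0 || (c : Int) - 1 > (l.length : Int) - 1) = true := by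
      simp; omega
    rw [e1, if_pos h0]
    simp [del_eq_eraseIdx]
  · have e1 : ((c : Int) - 1 < 0 || (c : Int) - 1 > (l.length : Int) - 1) = false := by
      simp; omega
    rw [e1]
    simp only [Bool.false_eq_true, if_false]
    have hcast' : (c : Int) - 1 = ((c - 1 : Nat) : Int) := by omega
    have p1 : PySem.List.pop? l ((c : Int) - 1) =
        some (l[c-1]'(by omega), l.eraseIdx (c-1)) := by
      rw [hcast']; exact PySem.List.pop?_natCast _ _ (by omega)
    rw [p1, if_neg h0]
    simp [del_eq_eraseIdx]

-- B's brute-force any, as an existential over deletion points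
theorem rhs_iff (l : List Int) (h : check_safety_alt l = false) :
    check_safety_dampener_alt l = true ↔
      ∃ j, j < l.length ∧ check_safety_alt (del l j) = true := by
  unfold check_safety_dampener_alt
  rw [if_neg (by simp [h]), List.any_eq_true]
  constructor
  · rintro ⟨i, hi, hf⟩
    rw [PySem.List.mem_pyRange_one] at hi
    refine ⟨i.toNat, by omega, ?_⟩
    rw [PySem.List.slice_to l hi.1, PySem.List.slice_from l (by omega : (0:Int) ≤ i + 1),
      show (i + 1).toNat = i.toNat + 1 by omega] at hf
    exact hf
  · rintro ⟨j, hj, hf⟩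
    refine ⟨(j : Int), by rw [PySem.List.mem_pyRange_one]; omega, ?_⟩
    rw [PySem.List.slice_to l (by omega : (0:Int) ≤ (j:Int)),
      PySem.List.slice_from l (by omega : (0:Int) ≤ (j:Int) + 1),
      show ((j : Int)).toNat = j by omega, show ((j : Int) + 1).toNat = j + 1 by omega]
    exact hf

theorem safe_del_pins (l : List Int) (c j : Nat) (bb : Bool)
    (hc : c + 1 < l.length) (hj : j < l.length)
    (hviol : okb (inc0 l) (dAt l c) = false)
    (hpre : ∀ m, m < c → okb (inc0 l) (dAt l m) = true)
    (hfar : j + 1 < c ∨ c + 1 < j)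
    (hall : AllOk bb (del l j)) : False := by
  have hlen : (del l j).length = l.length - 1 := length_del l j hj
  rcases hfar with hB | hA
  · -- j far left of c
    have e1 : dAt (del l j) j = dAt l (j + 1) := by
      rw [dAt_del l j j hj (by omega)]
      simp only [if_neg (by omega : ¬ j + 1 < j), if_pos (le_refl j)]
    have e2 : dAt (del l j) (c - 1) = dAt l c := by
      rw [dAt_del l j (c - 1) hj (by omega)]
      rw [if_neg (by omega), if_pos (by omega)]
      congr 1
      omega
    have h1 := hall j (by omega)
    have h2 := hall (c - 1) (by omega)
    rw [e1] at h1
    rw [e2] at h2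
    have hb1 : bb = decide (0 < dAt l (j + 1)) := okb_sign h1
    have hb2 : inc0 l = decide (0 < dAt l (j + 1)) := okb_sign (hpre (j + 1) (by omega))
    rw [hb1, ← hb2] at h2
    rw [h2] at hviol
    exact absurd hviol (by simp)
  · -- j far right of c
    have e1 : dAt (del l j) 0 = dAt l 0 := by
      rw [dAt_del l j 0 hj (by omega)]
      rw [if_pos (by omega)]
    have e2 : dAt (del l j) c = dAt l c := by
      rw [dAt_del l j c hj (by omega)]
      rw [if_pos (by omega)]
    have h1 := hall 0 (by omega)
    have h2 := hall c (by omega)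
    rw [e1] at h1
    rw [e2] at h2
    have hb1 : bb = decide (0 < dAt l 0) := okb_sign h1
    rw [hb1, ← inc0_eq] at h2
    rw [h2] at hviol
    exact absurd hviol (by simp)

theorem main_eq (l : List Int) : check_safety_dampener l = check_safety_dampener_alt l := by
  cases hF : findCand l 0 none with
  | none =>
    have hall : AllOk (inc0 l) l := by
      intro m hm
      have := findCand_none_spec l none 0 hF m (by omega) hm
      simpa [inc0] using this
    have hsafe : check_safety_alt l = true := alt_of_allOk l (inc0 l) hall
    unfold check_safety_dampener check_safety_dampener_alt
    rw [hF, if_pos hsafe]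
  | some c =>
    obtain ⟨-, hc, hviol, hpre⟩ := findCand_some_spec l none 0 c hF
    simp only [Option.getD_none] at hviol hpre
    rw [← inc0] at hviol hpre
    have hpre' : ∀ m, m < c → okb (inc0 l) (dAt l m) = true := fun m hm => hpre m (by omega) hm
    -- the whole level is unsafe
    have hunsafe : check_safety_alt l = false := by
      rw [Bool.eq_false_iff]
      intro hs
      rcases (safe_alt_iff l).mp hs with hall | hall <;>
      · have hb := okb_sign (hall 0 (by omega))
        have h2 := hall c hc
        rw [inc0_eq, ← hb] at hviol
        rw [hviol] at h2
        exact absurd h2 (by simp)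
    rw [lhs_eq l c hF hc, Bool.eq_iff_iff, List.any_eq_true, rhs_iff l hunsafe]
    constructor
    · rintro ⟨x, hx, hsx⟩
      rw [checkA_eq_alt] at hsx
      have hx' : x = del l (c - 1) ∨ x = del l c ∨ x = del l (c + 1) := by
        by_cases h0 : c = 0 <;> simp [h0] at hx ⊢ <;> tauto
      rcases hx' with rfl | rfl | rfl
      · exact ⟨c - 1, by omega, hsx⟩
      · exact ⟨c, by omega, hsx⟩
      · exact ⟨c + 1, by omega, hsx⟩
    · rintro ⟨j, hj, hsj⟩
      have hmem : del l j ∈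
          ((if c = 0 then [] else [del l (c - 1)]) ++ [del l c, del l (c + 1)]) := by
        by_cases hjc : j + 1 < c ∨ c + 1 < j
        · rcases (safe_alt_iff _).mp hsj with h | h
          · exact (safe_del_pins l c j true hc hj hviol hpre' hjc h).elim
          · exact (safe_del_pins l c j false hc hj hviol hpre' hjc h).elim
        · have hj3 : j = c - 1 ∨ j = c ∨ j = c + 1 := by omega
          rcases hj3 with h3 | h3 | h3 <;> rw [h3] <;> by_cases h0 : c = 0 <;> simp [h0]
      exact ⟨del l j, hmem, by rw [checkA_eq_alt]; exact hsj⟩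

-- ===== VERDICT (by name: the statement is the Claim_ definition above) =====
theorem check_safety_dampener_spec : Claim_equal_check_safety_dampener := by
  intro level _
  unfold Spec_check_safety_dampener
  exact main_eq level
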